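-- pv_equiv track=rewrite | github.com/akoarguel/Programacion-en-Inteligencia-Artificial | Prácticas/Unidad 2 - Introducción a Python/Trabajo de Clase/Pruebas/prueba2.py | dec4
-- ===== SOURCE A (Python) =====
-- def dec4(code, key):
--     cont = 0
--     for letra in key:
--         if not letra.isalnum():
--             cont += 1
--             if cont >= 2:
--                 break
--
--     n = len(code)
--
--     temp_msg = code[::-1]
--
--     plano_msg = ""
--
--     if cont >= 2:
--         for i in range(n):
--             letra = temp_msg[i]
--
--             if i < 3:
--                 plano_msg += chr(ord(letra) + 1)
--             else:
--                 plano_msg += letra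
--
--         return plano_msg
--
--     else:
--         punto_inicio = max(0, n - 3)
--         for i in range(n):
--             letra = temp_msg[i]
--
--             if i >= punto_inicio:
--                 plano_msg += chr(ord(letra) - 1)
--             else:
--                 plano_msg += letra
--
--         return plano_msg
-- ===== SOURCE B (Python) =====
-- def dec4(code, key):
--     # Shift the OPPOSITE boundary of the original string, then reverse by prepending.
--     if sum(not c.isalnum() for c in key) >= 2:
--         k = max(0, len(code) - 3)
--         shifted = code[:k] + ''.join(chr(ord(c) + 1) for c in code[k:])
--     else:
--         shifted = ''.join(chr(ord(c) - 1) for c in code[:3]) + code[3:]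
--     out = ''
--     for c in shifted:
--         out = c + out
--     return out
-- ===== Notes on version B (the rewrite author's own statement) =====
-- stated objective: simpler
-- what changed: Instead of reversing first and scanning every index of the reversed string with a per-index branch (A), B shifts the opposite 3-char boundary of the ORIGINAL string and then reverses the result with an accumulator prepend loop; the key's break-early scan becomes a total non-alnum count.
import Mathlib
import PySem

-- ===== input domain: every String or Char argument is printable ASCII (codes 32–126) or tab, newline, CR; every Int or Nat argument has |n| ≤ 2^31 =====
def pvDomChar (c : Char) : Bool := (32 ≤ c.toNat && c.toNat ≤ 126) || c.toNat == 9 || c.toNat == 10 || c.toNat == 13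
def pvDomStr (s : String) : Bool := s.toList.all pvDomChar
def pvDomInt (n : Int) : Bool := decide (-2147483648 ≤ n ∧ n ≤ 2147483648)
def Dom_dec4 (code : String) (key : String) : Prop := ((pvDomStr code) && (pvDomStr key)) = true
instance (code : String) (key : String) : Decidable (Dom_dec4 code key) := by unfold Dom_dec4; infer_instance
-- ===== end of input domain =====

-- B shifts the opposite boundary of the ORIGINAL string and then reverses by a prepend fold (simpler decomposition; no reversed-string indexing).


-- ===== PORT A =====
-- break-early scan of the key: stops as soon as cont reaches 2
def dec4CountLoop : List Char → Nat → Nat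
  | [], cont => cont
  | c :: rest, cont =>
    if !(PySem.Chars.isalnum c) then
      let cont' := cont + 1
      if cont' ≥ 2 then cont' else dec4CountLoop rest cont'
    else dec4CountLoop rest cont

def dec4 (code : String) (key : String) : String :=
  let cont := dec4CountLoop key.toList 0
  let n := code.toList.length
  let temp := code.toList.reverse          -- code[::-1]
  if cont ≥ 2 then
    -- for i in range(n): plano += (chr(ord(c)+1) if i < 3 else c)
    String.ofList ((PySem.List.enumerate temp 0).foldl
      (fun acc p => acc ++ [if p.1 < 3 then Char.ofNat (p.2.toNat + 1) else p.2]) [])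
  else
    let punto := n - 3                      -- Nat subtraction = Python max(0, n-3)
    String.ofList ((PySem.List.enumerate temp 0).foldl
      (fun acc p => acc ++ [if (punto : Int) ≤ p.1 then Char.ofNat (p.2.toNat - 1) else p.2]) [])

-- ===== PORT B =====
-- Source B: shift the boundary of the ORIGINAL string, then reverse via an accumulator prepend loop
def dec4_alt (code : String) (key : String) : String :=
  let shifted :=
    if (key.toList.filter (fun c => !(PySem.Chars.isalnum c))).length ≥ 2 then
      let k := code.toList.length - 3       -- Nat subtraction = Python max(0, len(code)-3)
      code.toList.take k ++ (code.toList.drop k).map (fun c => Char.ofNat (c.toNat + 1))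
    else
      (code.toList.take 3).map (fun c => Char.ofNat (c.toNat - 1)) ++ code.toList.drop 3
  String.ofList (shifted.foldl (fun out c => c :: out) [])   -- out = c + out

-- ===== PRECONDITION & SPEC =====
def Spec_dec4 (code : String) (key : String) (out : String) : Prop := out = dec4_alt code key
instance (code : String) (key : String) (out : String) : Decidable (Spec_dec4 code key out) := by unfold Spec_dec4; infer_instance

-- ===== CLAIM =====
def Claim_equal_dec4 : Prop := ∀ (code : String) (key : String), Dom_dec4 code key → Spec_dec4 code key (dec4 code key)

-- ===== LEMMAS AND PROOFS =====

-- countLoop reaches 2 iff the total count of non-alnum chars (plus the carry) does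
theorem dec4CountLoop_ge_two (cs : List Char) (cont : Nat) :
    (dec4CountLoop cs cont ≥ 2) ↔ (cont + (cs.filter (fun c => !(PySem.Chars.isalnum c))).length ≥ 2) := by
  induction cs generalizing cont with
  | nil => simp [dec4CountLoop]
  | cons c rest ih =>
    simp only [dec4CountLoop, List.filter_cons]
    by_cases h : PySem.Chars.isalnum c
    · simp [h, ih]
    · simp only [h, Bool.not_false, if_true]
      by_cases h2 : cont + 1 ≥ 2
      · simp [h2]; omega
      · simp [h2, ih]; omega

theorem foldl_prepend (l acc : List Char) :
    l.foldl (fun out c => c :: out) acc = l.reverse ++ acc := by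
  induction l generalizing acc with
  | nil => simp
  | cons c rest ih => simp [List.foldl, ih]

theorem enum_map_lt (g : Char → Char) (temp : List Char) (k : Nat) :
    (PySem.List.enumerate temp (k : Int)).map (fun p => if p.1 < 3 then g p.2 else p.2)
      = (temp.take (3 - k)).map g ++ temp.drop (3 - k) := by
  induction temp generalizing k with
  | nil => simp [PySem.List.enumerate_nil]
  | cons c rest ih =>
    rw [PySem.List.enumerate_cons, List.map_cons]
    have hk1 : ((k : Int) + 1) = ((k + 1 : Nat) : Int) := by push_cast; ring
    rw [hk1, ih]
    by_cases h : k < 3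
    · have h3 : 3 - k = (3 - (k + 1)) + 1 := by omega
      have hc : ((k : Int) < 3) := by exact_mod_cast h
      simp [h3, hc]
    · have h3 : 3 - k = 0 := by omega
      have h4 : 3 - (k + 1) = 0 := by omega
      have hc : ¬ ((k : Int) < 3) := by exact_mod_cast h
      simp [h3, h4, hc]

theorem enum_map_ge (g : Char → Char) (P : Nat) (temp : List Char) (k : Nat) :
    (PySem.List.enumerate temp (k : Int)).map (fun p => if (P : Int) ≤ p.1 then g p.2 else p.2)
      = temp.take (P - k) ++ ((temp.drop (P - k)).map g) := by
  induction temp generalizing k with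
  | nil => simp [PySem.List.enumerate_nil]
  | cons c rest ih =>
    rw [PySem.List.enumerate_cons, List.map_cons]
    have hk1 : ((k : Int) + 1) = ((k + 1 : Nat) : Int) := by push_cast; ring
    rw [hk1, ih]
    by_cases h : k < P
    · have h3 : P - k = (P - (k + 1)) + 1 := by omega
      have hc : ¬ ((P : Int) ≤ (k : Int)) := by exact_mod_cast (by omega : ¬ P ≤ k)
      simp [h3, hc]
    · have h3 : P - k = 0 := by omega
      have h4 : P - (k + 1) = 0 := by omega
      have hc : ((P : Int) ≤ (k : Int)) := by exact_mod_cast (by omega : P ≤ k)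
      simp [h3, h4, hc]

-- take/drop of a reverse, stated with Nat-sub clamping (no side condition)
theorem take_reverse_eq (l : List Char) (m : Nat) :
    l.reverse.take m = (l.drop (l.length - m)).reverse := by
  rcases le_or_gt m l.length with h | h
  · rw [List.reverse_drop]; congr 1; omega
  · rw [List.take_of_length_le (by simp; omega), Nat.sub_eq_zero_of_le (le_of_lt h),
      List.drop_zero]

theorem drop_reverse_eq (l : List Char) (m : Nat) :
    l.reverse.drop m = (l.take (l.length - m)).reverse := by
  rcases le_or_gt m l.length with h | h
  · rw [List.reverse_take]; congr 1; omega
  · rw [Nat.sub_eq_zero_of_le (le_of_lt h), List.take_zero, List.reverse_nil,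
      List.drop_of_length_le (by simp; omega)]

theorem drop_clamp (l : List Char) : l.drop (l.length - (l.length - 3)) = l.drop 3 := by
  rcases le_or_gt 3 l.length with h | h
  · congr 1; omega
  · rw [List.drop_of_length_le (by omega), List.drop_of_length_le (by omega)]

theorem take_clamp (l : List Char) : l.take (l.length - (l.length - 3)) = l.take 3 := by
  rcases le_or_gt 3 l.length with h | h
  · congr 1; omega
  · rw [List.take_of_length_le (by omega), List.take_of_length_le (by omega)]

-- ===== VERDICT =====
theorem dec4_spec : Claim_equal_dec4 := by
  intro code key _
  unfold Spec_dec4 dec4 dec4_alt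
  have hc : (dec4CountLoop key.toList 0 >= 2)
      = ((key.toList.filter (fun c => !(PySem.Chars.isalnum c))).length >= 2) := by
    rw [eq_iff_iff, dec4CountLoop_ge_two]; omega
  simp only [hc]
  split_ifs with h
  · rw [PySem.List.foldl_append_singleton_eq_map, List.nil_append, foldl_prepend,
      List.append_nil]
    have := enum_map_lt (fun c => Char.ofNat (c.toNat + 1)) code.toList.reverse 0
    simp only [Nat.cast_zero, Nat.sub_zero] at this ⊢
    rw [this, take_reverse_eq, drop_reverse_eq, List.map_reverse, List.reverse_append]
  · rw [PySem.List.foldl_append_singleton_eq_map, List.nil_append, foldl_prepend,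
      List.append_nil]
    have := enum_map_ge (fun c => Char.ofNat (c.toNat - 1)) (code.toList.length - 3) code.toList.reverse 0
    simp only [Nat.cast_zero, Nat.sub_zero] at this ⊢
    rw [this, take_reverse_eq, drop_reverse_eq, List.map_reverse, drop_clamp, take_clamp, List.reverse_append]
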